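-- pv_equiv track=rewrite | github.com/42069jb/pythonprjct | Practice/scnd_most_repeated_element_array.py | finding_element
-- ===== SOURCE A (Python) =====
-- def finding_element(list1,list2):
--     f=s=min(list2)
--     for item in list2:
--         if item>f:
--             s=f
--             f=item
--         elif item>s and item!=f:
--             s=item
--     v=list2.index(s)
--     return list1[v]
-- ===== SOURCE B (Python) =====
-- def finding_element(list1, list2):
--     uniq = sorted(set(list2))
--     s = uniq[-2] if len(uniq) > 1 else uniq[0]
--     return list1[list2.index(s)]
-- ===== Notes on version B (the rewrite author's own statement) =====
-- stated objective: simpler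
-- what changed: Replaces A's min()-seeded single-pass top-2 tracking scan with sorting the distinct values and taking the second-largest (or the sole value) directly, then one index lookup.
import Mathlib
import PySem

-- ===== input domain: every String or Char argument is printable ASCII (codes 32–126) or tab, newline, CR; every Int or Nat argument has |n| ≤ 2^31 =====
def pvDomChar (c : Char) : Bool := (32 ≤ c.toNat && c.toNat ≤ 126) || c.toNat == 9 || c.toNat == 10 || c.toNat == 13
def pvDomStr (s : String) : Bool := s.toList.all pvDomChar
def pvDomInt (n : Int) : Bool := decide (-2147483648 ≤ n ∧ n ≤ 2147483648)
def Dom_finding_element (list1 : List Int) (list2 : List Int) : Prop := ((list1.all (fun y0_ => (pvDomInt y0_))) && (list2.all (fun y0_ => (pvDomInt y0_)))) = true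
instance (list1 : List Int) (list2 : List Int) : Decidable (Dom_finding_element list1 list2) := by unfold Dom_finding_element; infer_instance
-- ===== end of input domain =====

-- B replaces A's min()-seeded top-2 tracking scan by sorting the distinct values and
-- indexing the second-largest directly (objective: simpler).

-- ===== PORT A =====
def finding_element (list1 : List Int) (list2 : List Int) : Int :=
  -- f=s=min(list2)  (min raises ValueError on []; excluded by Pre_)
  let m := (PySem.List.min? list2 (fun x => x)).getD 0
  -- for item in list2: track (f, s)
  let fs := list2.foldl (fun (p : Int × Int) item =>
      if item > p.1 then (item, p.1)
      else if item > p.2 ∧ item ≠ p.1 then (p.1, item)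
      else p) (m, m)
  -- v = list2.index(s); return list1[v]  (IndexError excluded by Pre_)
  let v := (PySem.List.index? list2 fs.2).getD 0
  (PySem.List.pyGet? list1 (v : Int)).getD 0

-- ===== PORT B =====
def finding_element_alt (list1 : List Int) (list2 : List Int) : Int :=
  -- uniq = sorted(set(list2))
  let uniq := PySem.List.sorted (PySem.Set.ofList list2) (fun x => x) false
  -- s = uniq[-2] if len(uniq) > 1 else uniq[0]  (IndexError on empty list2; excluded by Pre_)
  let s := if 1 < uniq.length then (PySem.List.pyGet? uniq (-2)).getD 0
           else (PySem.List.pyGet? uniq 0).getD 0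
  -- return list1[list2.index(s)]
  let v := (PySem.List.index? list2 s).getD 0
  (PySem.List.pyGet? list1 (v : Int)).getD 0

-- ===== PRECONDITION & SPEC =====
-- the value A looks up: the largest element strictly below the maximum (the second-largest
-- distinct value), or the maximum itself when all elements are equal; used only to state Pre_
def pvSecondVal (l : List Int) : Int :=
  match PySem.List.max? l (fun x => x) with
  | none => 0
  | some m =>
    match PySem.List.max? (l.filter (fun x => decide (x < m))) (fun x => x) with
    | none => m
    | some s => s

-- Pre_ excludes exactly the inputs where Python A raises: empty list2 (ValueError from min)
-- and a first index of the target value falling outside list1 (IndexError).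
def Pre_finding_element (list1 : List Int) (list2 : List Int) : Prop :=
  list2 ≠ [] ∧ (PySem.List.index? list2 (pvSecondVal list2)).getD 0 < list1.length
instance (list1 : List Int) (list2 : List Int) : Decidable (Pre_finding_element list1 list2) := by
  unfold Pre_finding_element; infer_instance

def pvWitness_finding_element : List Int × List Int := ([10, 20, 30], [5, 9, 7])

def Spec_finding_element (list1 : List Int) (list2 : List Int) (out : Int) : Prop := out = finding_element_alt list1 list2
instance (list1 : List Int) (list2 : List Int) (out : Int) : Decidable (Spec_finding_element list1 list2 out) := by unfold Spec_finding_element; infer_instance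

-- ===== CLAIM (what is proved, stated in full; the proofs are below) =====
def Claim_equal_finding_element : Prop := ∀ (list1 : List Int) (list2 : List Int), Dom_finding_element list1 list2 → Pre_finding_element list1 list2 → Spec_finding_element list1 list2 (finding_element list1 list2)

-- ===== LEMMAS AND PROOFS =====

-- m is the greatest element of l
def MaxOf (l : List Int) (m : Int) : Prop := m ∈ l ∧ ∀ x ∈ l, x ≤ m

-- s is the second value A tracks: the greatest element strictly below the maximum m,
-- or m itself when all elements equal m
def IsSecond (l : List Int) (m s : Int) : Prop :=
  ((∀ x ∈ l, x = m) ∧ s = m) ∨ (s ∈ l ∧ s < m ∧ ∀ x ∈ l, x < m → x ≤ s)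

theorem maxOf_unique {l : List Int} {m₁ m₂ : Int} (h₁ : MaxOf l m₁) (h₂ : MaxOf l m₂) :
    m₁ = m₂ :=
  le_antisymm (h₂.2 _ h₁.1) (h₁.2 _ h₂.1)

theorem isSecond_unique {l : List Int} {m s₁ s₂ : Int}
    (h₁ : IsSecond l m s₁) (h₂ : IsSecond l m s₂) : s₁ = s₂ := by
  rcases h₁ with ⟨ha, rfl⟩ | ⟨hm₁, hlt₁, hb₁⟩ <;> rcases h₂ with ⟨hc, rfl⟩ | ⟨hm₂, hlt₂, hb₂⟩
  · rfl
  · exact absurd (ha _ hm₂) (by omega)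
  · exact absurd (hc _ hm₁) (by omega)
  · exact le_antisymm (hb₂ _ hm₁ hlt₁) (hb₁ _ hm₂ hlt₂)

theorem maxOf_congr {l l' : List Int} {m : Int} (h : ∀ x, x ∈ l ↔ x ∈ l') (hm : MaxOf l m) :
    MaxOf l' m := ⟨(h m).1 hm.1, fun x hx => hm.2 x ((h x).2 hx)⟩

theorem isSecond_congr {l l' : List Int} {m s : Int} (h : ∀ x, x ∈ l ↔ x ∈ l')
    (hs : IsSecond l m s) : IsSecond l' m s := by
  rcases hs with ⟨ha, rfl⟩ | ⟨hm, hlt, hb⟩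
  · exact Or.inl ⟨fun x hx => ha x ((h x).2 hx), rfl⟩
  · exact Or.inr ⟨(h s).1 hm, hlt, fun x hx => hb x ((h x).2 hx)⟩

-- the loop invariant for A's scan over `rest` after having processed `pre`
theorem foldA_inv (m₀ : Int) (rest : List Int) :
    ∀ (pre : List Int) (f s : Int),
      (∀ x ∈ rest, m₀ ≤ x) →
      MaxOf (m₀ :: pre) f → IsSecond (m₀ :: pre) f s →
      MaxOf (m₀ :: (pre ++ rest))
          (rest.foldl (fun (p : Int × Int) item =>
            if item > p.1 then (item, p.1)
            else if item > p.2 ∧ item ≠ p.1 then (p.1, item)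
            else p) (f, s)).1 ∧
      IsSecond (m₀ :: (pre ++ rest))
          (rest.foldl (fun (p : Int × Int) item =>
            if item > p.1 then (item, p.1)
            else if item > p.2 ∧ item ≠ p.1 then (p.1, item)
            else p) (f, s)).1
          (rest.foldl (fun (p : Int × Int) item =>
            if item > p.1 then (item, p.1)
            else if item > p.2 ∧ item ≠ p.1 then (p.1, item)
            else p) (f, s)).2 := by
  induction rest with
  | nil => intro pre f s _ hmax hsec; simpa using ⟨hmax, hsec⟩
  | cons i rest ih =>
    intro pre f s hrest hmax hsec
    have hi : m₀ ≤ i := hrest i (by simp)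
    have hmem : ∀ x, x ∈ m₀ :: (pre ++ [i]) ↔ x ∈ (m₀ :: pre) ∨ x = i := by
      intro x; simp [or_assoc]
    have hstep :
        MaxOf (m₀ :: (pre ++ [i]))
          (if i > f then (i, f) else if i > s ∧ i ≠ f then (f, i) else (f, s) : Int × Int).1 ∧
        IsSecond (m₀ :: (pre ++ [i]))
          (if i > f then (i, f) else if i > s ∧ i ≠ f then (f, i) else (f, s) : Int × Int).1
          (if i > f then (i, f) else if i > s ∧ i ≠ f then (f, i) else (f, s) : Int × Int).2 := by
      obtain ⟨hfmem, hfub⟩ := hmax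
      split_ifs with h1 h2
      · -- item > f : f' = i, s' = f
        refine ⟨⟨(hmem i).2 (Or.inr rfl), ?_⟩, Or.inr ⟨(hmem f).2 (Or.inl hfmem), h1, ?_⟩⟩
        · intro x hx; rcases (hmem x).1 hx with hx' | rfl
          · exact le_of_lt (lt_of_le_of_lt (hfub x hx') h1)
          · exact le_refl x
        · intro x hx _; rcases (hmem x).1 hx with hx' | rfl
          · exact hfub x hx'
          · omega
      · -- item ≤ f, item > s, item ≠ f : s' = i (so i < f)
        have hif : i < f := lt_of_le_of_ne (not_lt.mp h1) h2.2
        refine ⟨⟨(hmem f).2 (Or.inl hfmem), ?_⟩, Or.inr ⟨(hmem i).2 (Or.inr rfl), hif, ?_⟩⟩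
        · intro x hx; rcases (hmem x).1 hx with hx' | rfl
          · exact hfub x hx'
          · exact le_of_lt hif
        · intro x hx hxf; rcases (hmem x).1 hx with hx' | rfl
          · rcases hsec with ⟨ha, _⟩ | ⟨_, _, hb⟩
            · exact absurd (ha x hx') (by omega)
            · have := hb x hx' hxf; omega
          · exact le_refl x
      · -- else : state unchanged
        refine ⟨⟨(hmem f).2 (Or.inl hfmem), ?_⟩, ?_⟩
        · intro x hx; rcases (hmem x).1 hx with hx' | rfl
          · exact hfub x hx'
          · exact not_lt.mp h1
        · have h2' : i > s → i = f := by
            intro hgt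
            by_contra hne
            exact h2 ⟨hgt, hne⟩
          rcases hsec with ⟨ha, hsf⟩ | ⟨hsm, hsf, hb⟩
          · -- all equal f; i ≤ f, i ≥ m₀ = f forces i = f
            have hm0 : m₀ = f := ha m₀ (by simp)
            refine Or.inl ⟨?_, hsf⟩
            intro x hx; rcases (hmem x).1 hx with hx' | rfl
            · exact ha x hx'
            · omega
          · refine Or.inr ⟨(hmem s).2 (Or.inl hsm), hsf, ?_⟩
            intro x hx hxf; rcases (hmem x).1 hx with hx' | rfl
            · exact hb x hx' hxf
            · rcases lt_or_ge s x with hsx | hsx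
              · have := h2' hsx; omega
              · omega
    obtain ⟨hmax', hsec'⟩ := hstep
    have := ih (pre ++ [i]) _ _ (fun x hx => hrest x (by simp [hx])) hmax' hsec'
    simpa [List.foldl_cons, List.append_assoc] using this

-- strictly increasing lists: every element is ≤ the last one, and every element
-- strictly below the last is ≤ the one before the last
theorem strict_sorted_facts {u : List Int} (hp : u.Pairwise (· < ·)) {n : Nat}
    (hn : u.length = n) (h2 : 2 ≤ n) :
    MaxOf u (u.getD (n - 1) 0) ∧
    (u.getD (n - 2) 0 ∈ u ∧ u.getD (n - 2) 0 < u.getD (n - 1) 0 ∧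
      ∀ x ∈ u, x < u.getD (n - 1) 0 → x ≤ u.getD (n - 2) 0) := by
  subst hn
  have hget := (List.pairwise_iff_getElem).1 hp
  have h1lt : u.length - 1 < u.length := by omega
  have h2lt : u.length - 2 < u.length := by omega
  have hd1 : u.getD (u.length - 1) 0 = u[u.length - 1] := List.getD_eq_getElem u 0 h1lt
  have hd2 : u.getD (u.length - 2) 0 = u[u.length - 2] := List.getD_eq_getElem u 0 h2lt
  rw [hd1, hd2]
  have hlast : ∀ x ∈ u, x ≤ u[u.length - 1] := by
    intro x hx
    obtain ⟨k, hk, rfl⟩ := List.mem_iff_getElem.1 hx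
    rcases eq_or_lt_of_le (by omega : k ≤ u.length - 1) with rfl | hklt
    · exact le_refl _
    · exact le_of_lt (hget k (u.length - 1) hk h1lt hklt)
  refine ⟨⟨List.getElem_mem h1lt, hlast⟩, List.getElem_mem h2lt,
    hget (u.length - 2) (u.length - 1) h2lt h1lt (by omega), ?_⟩
  intro x hx hxlt
  obtain ⟨k, hk, rfl⟩ := List.mem_iff_getElem.1 hx
  have hkne : k ≠ u.length - 1 := by rintro rfl; omega
  rcases eq_or_lt_of_le (by omega : k ≤ u.length - 2) with rfl | hklt
  · exact le_refl _
  · exact le_of_lt (hget k (u.length - 2) hk h2lt hklt)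

-- A's fold produces the maximum and the second value of list2
theorem foldA_spec (l : List Int) (hne : l ≠ []) :
    MaxOf l (l.foldl (fun (p : Int × Int) item =>
        if item > p.1 then (item, p.1)
        else if item > p.2 ∧ item ≠ p.1 then (p.1, item)
        else p) (((PySem.List.min? l (fun x => x)).getD 0),
                 ((PySem.List.min? l (fun x => x)).getD 0))).1 ∧
    IsSecond l (l.foldl (fun (p : Int × Int) item =>
        if item > p.1 then (item, p.1)
        else if item > p.2 ∧ item ≠ p.1 then (p.1, item)
        else p) (((PySem.List.min? l (fun x => x)).getD 0),
                 ((PySem.List.min? l (fun x => x)).getD 0))).1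
      (l.foldl (fun (p : Int × Int) item =>
        if item > p.1 then (item, p.1)
        else if item > p.2 ∧ item ≠ p.1 then (p.1, item)
        else p) (((PySem.List.min? l (fun x => x)).getD 0),
                 ((PySem.List.min? l (fun x => x)).getD 0))).2 := by
  obtain ⟨m₀, hm₀⟩ : ∃ m₀, PySem.List.min? l (fun x => x) = some m₀ := by
    cases h : PySem.List.min? l (fun x => x) with
    | none => exact absurd ((PySem.List.min?_eq_none_iff l (fun x => x)).1 h) hne
    | some m => exact ⟨m, rfl⟩
  have hm₀mem : m₀ ∈ l := PySem.List.min?_mem hm₀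
  have hm₀min : ∀ x ∈ l, m₀ ≤ x := fun x hx => PySem.List.min?_isMin hm₀ x hx
  rw [hm₀]
  have := foldA_inv m₀ l [] m₀ m₀ hm₀min
    ⟨by simp, by intro x hx; simp at hx; omega⟩
    (Or.inl ⟨by intro x hx; simp at hx; omega, rfl⟩)
  simp only [List.nil_append, Option.getD_some] at this ⊢
  have hmemeq : ∀ x, x ∈ m₀ :: l ↔ x ∈ l := by
    intro x; constructor
    · intro hx
      rcases List.mem_cons.mp hx with rfl | hx'
      · exact hm₀mem
      · exact hx'
    · exact fun hx => List.mem_cons_of_mem _ hx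
  exact ⟨maxOf_congr hmemeq this.1, isSecond_congr hmemeq this.2⟩

-- B's selected value is the maximum's runner-up too
theorem altB_spec (l : List Int) (hne : l ≠ []) :
    ∃ m, MaxOf l m ∧
      IsSecond l m
        (if 1 < (PySem.List.sorted (PySem.Set.ofList l) (fun x => x) false).length
         then (PySem.List.pyGet? (PySem.List.sorted (PySem.Set.ofList l) (fun x => x) false) (-2)).getD 0
         else (PySem.List.pyGet? (PySem.List.sorted (PySem.Set.ofList l) (fun x => x) false) 0).getD 0) := by
  set u := PySem.List.sorted (PySem.Set.ofList l) (fun x => x) false with hu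
  have hmem : ∀ x, x ∈ u ↔ x ∈ l := by
    intro x; rw [hu, PySem.List.mem_sorted, PySem.Set.mem_ofList]
  have hpw : u.Pairwise (· < ·) := PySem.List.sorted_ofList_pairwise_lt l
  have hune : u ≠ [] := by
    intro h
    obtain ⟨x, hx⟩ := List.exists_mem_of_ne_nil l hne
    rw [h] at hmem
    exact absurd ((hmem x).2 hx) (by simp)
  rcases lt_or_ge 1 u.length with hlen | hlen
  · -- at least two distinct values
    have hget2 : PySem.List.pyGet? u (-2) = u[u.length - 2]? := by
      exact PySem.List.pyGet?_neg_ofNat u 2 (by omega) (by omega)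
    obtain ⟨hmax, hmem2, hlt2, hb2⟩ := strict_sorted_facts hpw rfl hlen
    refine ⟨u.getD (u.length - 1) 0, maxOf_congr hmem hmax, ?_⟩
    have hval : (PySem.List.pyGet? u (-2)).getD 0 = u.getD (u.length - 2) 0 := by
      rw [hget2, List.getD_eq_getElem?_getD]
    rw [if_pos hlen, hval]
    exact isSecond_congr hmem (Or.inr ⟨hmem2, hlt2, hb2⟩)
  · -- exactly one distinct value: every element of l equals it
    obtain ⟨a, hua⟩ : ∃ a, u = [a] := by
      match u, hune, hlen with
      | [a], _, _ => exact ⟨a, rfl⟩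
      | a :: b :: t, _, hlen => simp at hlen
    rw [hua] at hmem ⊢
    have hall : ∀ x ∈ l, x = a := by
      intro x hx
      simpa using (hmem x).2 hx
    refine ⟨a, ⟨(hmem a).1 (by simp), fun x hx => le_of_eq (hall x hx)⟩, ?_⟩
    rw [if_neg (by simp)]
    exact Or.inl ⟨by simpa using hall, by simp⟩

-- ===== VERDICT (by name: the statement is the Claim_ definition above) =====
theorem finding_element_spec : Claim_equal_finding_element := by
  intro list1 list2 _ hpre
  obtain ⟨hne, _⟩ := hpre
  obtain ⟨hmaxA, hsecA⟩ := foldA_spec list2 hne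
  obtain ⟨m, hmaxB, hsecB⟩ := altB_spec list2 hne
  have hmeq := maxOf_unique hmaxA hmaxB
  rw [hmeq] at hsecA
  have hseq := isSecond_unique hsecA hsecB
  unfold Spec_finding_element finding_element finding_element_alt
  simp only [hseq]
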